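-- pv_equiv track=rewrite | github.com/LeiMa0324/Krone_official | krone_hierarchy/Krone_seq.py | contains_existing_seq
-- ===== SOURCE A (Python) =====
-- def is_sublist(test, trains):
--     test_seq = '|'.join(test)
--     for train in trains:
--         train_seq = '|'.join(train)
--         if test_seq in train_seq:
--             return True
--     return False
--
-- def find_largest_prefix_subsequence(test, train_seqs):
--     if len(test) <= 1:
--         return [], (0, 0)
--     largest_prefix_subsequence = []
--     for i in range(0, len(test)):
--         subseq = test[: i+1]
--         is_sub = is_sublist(subseq, train_seqs)
--         if is_sub:
--             largest_prefix_subsequence.append(test[i])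
--         else:
--             return largest_prefix_subsequence, (0, i)
--     return largest_prefix_subsequence, (0, len(test))
--
-- def find_largest_suffix_subsequence(test, train_seqs):
--     if len(test) <= 1:
--         return [], (len(test), len(test))
--     largest_suffix_subsequence = []
--     for i in range(len(test)-1, -1, -1):
--         subseq = test[i: len(test)]
--         is_sub = is_sublist(subseq, train_seqs)
--         if is_sub:
--             largest_suffix_subsequence.append(test[i])
--         else:
--             largest_suffix_subsequence.reverse()
--             return largest_suffix_subsequence, (i +1,len(test))
--     largest_suffix_subsequence.reverse()
--     return largest_suffix_subsequence, (0, len(test))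
--
-- def contains_existing_seq(test_seq, train_seqs, ):
--     direct_sub =  is_sublist(test_seq, train_seqs)
--     if direct_sub:
--         return True
--     else:
--         largest_prefix_subsequence, prefix_range = find_largest_prefix_subsequence(test_seq, train_seqs)
--         largest_suffix_subsequence, suffix_range = find_largest_suffix_subsequence(test_seq, train_seqs)
--         if prefix_range[1] > suffix_range[0]:
--             return True
--         else:
--             while prefix_range[1]-prefix_range[0]> 0 and suffix_range[1]-suffix_range[0]> 0 and prefix_range[1] < suffix_range[0]+1:
--                 test_seq = test_seq[prefix_range[1]:suffix_range[0]+1]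
--                 largest_prefix_subsequence, prefix_range = find_largest_prefix_subsequence(test_seq, train_seqs)
--                 largest_suffix_subsequence, suffix_range = find_largest_suffix_subsequence(test_seq, train_seqs)
--                 if prefix_range[1] > suffix_range[0]:
--                     return True
--
--             return False
-- ===== SOURCE B (Python) =====
-- def _max_true(pred, n):
--     # largest k in [0, n] with pred(k) true for all of 1..k (pred monotone); 0 if pred(1) fails
--     lo, hi = 0, n
--     while lo < hi:
--         mid = (lo + hi + 1) // 2
--         if pred(mid):
--             lo = mid
--         else:
--             hi = mid - 1
--     return lo
--
-- def _min_true(pred, n):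
--     # smallest k in [0, n-1] with pred(k) true from k on (pred monotone); n if none
--     lo, hi = 0, n
--     while lo < hi:
--         mid = (lo + hi) // 2
--         if pred(mid):
--             hi = mid
--         else:
--             lo = mid + 1
--     return lo
--
-- def contains_existing_seq(test_seq, train_seqs):
--     joined = ['|'.join(t) for t in train_seqs]
--
--     def ok(xs):
--         j = '|'.join(xs)
--         return any(j in tj for tj in joined)
--
--     if ok(test_seq):
--         return True
--     seg = test_seq
--     while len(seg) > 1:
--         n = len(seg)
--         # '|'.join of a shorter prefix/longer-start suffix is a prefix/suffix of the longer
--         # one's join, so both predicates are monotone and binary search applies.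
--         p = _max_true(lambda k: ok(seg[:k]), n)
--         s = _min_true(lambda i: ok(seg[i:]), n)
--         if p > s:
--             return True
--         if not (p > 0 and s < n and p <= s):
--             return False
--         seg = seg[p:s + 1]
--     return False
-- ===== Notes on version B (the rewrite author's own statement) =====
-- stated objective: alternative
-- what changed: B joins every training sequence once up front and replaces A's linear prefix/suffix scans (each step re-joining and re-scanning all training sequences) by binary searches over the monotone joined-prefix/joined-suffix containment predicates.
import Mathlib
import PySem

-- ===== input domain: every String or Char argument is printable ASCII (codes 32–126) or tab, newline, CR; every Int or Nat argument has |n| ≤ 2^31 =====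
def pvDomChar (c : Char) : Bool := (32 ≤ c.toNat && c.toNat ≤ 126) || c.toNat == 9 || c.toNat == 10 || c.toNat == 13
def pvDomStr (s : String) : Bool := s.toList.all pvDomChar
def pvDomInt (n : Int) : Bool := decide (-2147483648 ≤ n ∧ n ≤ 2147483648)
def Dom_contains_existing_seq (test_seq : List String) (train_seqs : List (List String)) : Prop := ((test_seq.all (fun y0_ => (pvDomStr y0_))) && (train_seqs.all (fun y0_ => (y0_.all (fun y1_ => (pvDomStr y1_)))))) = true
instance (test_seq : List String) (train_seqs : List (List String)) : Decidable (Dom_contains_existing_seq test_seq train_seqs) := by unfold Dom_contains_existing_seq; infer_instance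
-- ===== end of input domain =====

-- B replaces A's linear prefix/suffix scans (which re-join every train per membership test) by
-- binary searches over the monotone join-containment predicates, with the train joins built once.

-- ===== PORT A =====

-- is_sublist: early-return 'for train in trains' is List.any
def isSublist (test : List String) (trains : List (List String)) : Bool :=
  let test_seq := PySem.Str.join "|" test
  trains.any (fun train => PySem.Str.isIn test_seq (PySem.Str.join "|" train))

-- the 'for i in range(0, len(test))' loop of find_largest_prefix_subsequence
-- (test.getD i "" is test[i]: i < test.length holds at every use)
-- fuel d = test.length - i makes the recursion structural; at d = 0, i = test.length,
-- so the fuel arm returns exactly what the i ≥ len(test) arm would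
def flpsLoop (test : List String) (trains : List (List String)) :
    Nat → Nat → List String → List String × (Int × Int)
  | 0, _, acc => (acc, (0, (test.length : Int)))
  | d + 1, i, acc =>
    if i < test.length then
      let subseq := PySem.List.slice test none (some ((i : Int) + 1))
      if isSublist subseq trains then flpsLoop test trains d (i + 1) (acc ++ [test.getD i ""])
      else (acc, (0, (i : Int)))
    else (acc, (0, (test.length : Int)))

def find_largest_prefix (test : List String) (trains : List (List String)) :
    List String × (Int × Int) :=
  if test.length ≤ 1 then ([], (0, 0)) else flpsLoop test trains test.length 0 []

-- the 'for i in range(len(test)-1, -1, -1)' loop; j = i+1 counts down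
def flssLoop (test : List String) (trains : List (List String)) (j : Nat) (acc : List String) :
    List String × (Int × Int) :=
  match j with
  | 0 => (acc.reverse, (0, (test.length : Int)))
  | i + 1 =>
    let subseq := PySem.List.slice test (some (i : Int)) (some (test.length : Int))
    if isSublist subseq trains then flssLoop test trains i (acc ++ [test.getD i ""])
    else (acc.reverse, ((i : Int) + 1, (test.length : Int)))

def find_largest_suffix (test : List String) (trains : List (List String)) :
    List String × (Int × Int) :=
  if test.length ≤ 1 then ([], ((test.length : Int), (test.length : Int)))
  else flssLoop test trains test.length []

-- the while loop of contains_existing_seq; fuel makes it total (the segment strictly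
-- shrinks at each pass, so fuel = initial length never runs out)
def aLoop (trains : List (List String)) (fuel : Nat) (test : List String) (pr sr : Int × Int) : Bool :=
  match fuel with
  | 0 => false
  | fuel + 1 =>
    if pr.2 - pr.1 > 0 && sr.2 - sr.1 > 0 && pr.2 < sr.1 + 1 then
      let test' := PySem.List.slice test (some pr.2) (some (sr.1 + 1))
      let pr' := (find_largest_prefix test' trains).2
      let sr' := (find_largest_suffix test' trains).2
      if pr'.2 > sr'.1 then true else aLoop trains fuel test' pr' sr'
    else false

def contains_existing_seq (test_seq : List String) (train_seqs : List (List String)) : Bool :=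
  if isSublist test_seq train_seqs then true
  else
    let pr := (find_largest_prefix test_seq train_seqs).2
    let sr := (find_largest_suffix test_seq train_seqs).2
    if pr.2 > sr.1 then true
    else aLoop train_seqs test_seq.length test_seq pr sr

-- ===== PORT B =====

-- B's local 'ok' over the precomputed train joins
def okB (joined : List String) (xs : List String) : Bool :=
  let j := PySem.Str.join "|" xs
  joined.any (fun tj => PySem.Str.isIn j tj)

-- _max_true: binary search for the largest k in [lo, hi] with pred k
def bsMaxGo (pred : Nat → Bool) : Nat → Nat → Nat → Nat
  | 0, lo, _ => lo
  | d + 1, lo, hi =>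
    if lo < hi then
      let mid := (lo + hi + 1) / 2
      if pred mid then bsMaxGo pred d mid hi else bsMaxGo pred d lo (mid - 1)
    else lo

-- fuel hi - lo makes the loop structural; the interval shrinks by ≥ 1 per pass
-- (Nat division is exact for Python's (lo+hi+1)//2: lo, hi are nonnegative ints)
def bsMax (pred : Nat → Bool) (lo hi : Nat) : Nat := bsMaxGo pred (hi - lo) lo hi

-- _min_true: binary search for the smallest k in [lo, hi] with pred k
def bsMinGo (pred : Nat → Bool) : Nat → Nat → Nat → Nat
  | 0, lo, _ => lo
  | d + 1, lo, hi =>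
    if lo < hi then
      let mid := (lo + hi) / 2
      if pred mid then bsMinGo pred d lo mid else bsMinGo pred d (mid + 1) hi
    else lo

-- fuel hi - lo makes the loop structural; the interval shrinks by ≥ 1 per pass
def bsMin (pred : Nat → Bool) (lo hi : Nat) : Nat := bsMinGo pred (hi - lo) lo hi

-- B's while loop; same fuel remark as for aLoop
def bLoop (joined : List String) (fuel : Nat) (seg : List String) : Bool :=
  match fuel with
  | 0 => false
  | fuel + 1 =>
    if 1 < seg.length then
      let n := seg.length
      let p := bsMax (fun k => okB joined (PySem.List.slice seg none (some (k : Int)))) 0 n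
      let s := bsMin (fun i => okB joined (PySem.List.slice seg (some (i : Int)) none)) 0 n
      if s < p then true
      else if decide (0 < p) && decide (s < n) && decide (p ≤ s) then
        bLoop joined fuel (PySem.List.slice seg (some (p : Int)) (some ((s : Int) + 1)))
      else false
    else false

def contains_existing_seq_alt (test_seq : List String) (train_seqs : List (List String)) : Bool :=
  let joined := train_seqs.map (fun t => PySem.Str.join "|" t)
  if okB joined test_seq then true
  else bLoop joined (test_seq.length + 1) test_seq

-- ===== PRECONDITION & SPEC =====
def Spec_contains_existing_seq (test_seq : List String) (train_seqs : List (List String)) (out : Bool) : Prop := out = contains_existing_seq_alt test_seq train_seqs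
instance (test_seq : List String) (train_seqs : List (List String)) (out : Bool) : Decidable (Spec_contains_existing_seq test_seq train_seqs out) := by unfold Spec_contains_existing_seq; infer_instance

-- ===== CLAIM (what is proved, stated in full; the proofs are below) =====
def Claim_equal_contains_existing_seq : Prop := ∀ (test_seq : List String) (train_seqs : List (List String)), Dom_contains_existing_seq test_seq train_seqs → Spec_contains_existing_seq test_seq train_seqs (contains_existing_seq test_seq train_seqs)

-- ===== LEMMAS AND PROOFS =====

-- B's 'ok' over precomputed joins is A's is_sublist
theorem okB_eq (trains : List (List String)) (xs : List String) :
    okB (trains.map (fun t => PySem.Str.join "|" t)) xs = isSublist xs trains := by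
  simp [okB, isSublist, List.any_map, Function.comp_def]

-- Chars.join is monotone with respect to the prefix order on the part lists
theorem chars_join_prefix_mono (sep : List Char) :
    ∀ (M N : List (List Char)), M <+: N →
      PySem.Chars.join sep M <+: PySem.Chars.join sep N
  | [], _, _ => by simp [PySem.Chars.join_nil]
  | [a], N, h => by
    obtain ⟨t, rfl⟩ := h
    cases t with
    | nil => simp
    | cons b r =>
      rw [PySem.Chars.join_singleton,
        show ([a] ++ b :: r) = a :: b :: r from rfl, PySem.Chars.join_cons_cons]
      simp only [List.append_assoc]
      exact
        List.prefix_append a (sep ++ PySem.Chars.join sep (b :: r))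
  | a :: c :: M', N, h => by
    obtain ⟨t, rfl⟩ := h
    rw [PySem.Chars.join_cons_cons,
      show ((a :: c :: M') ++ t) = a :: c :: (M' ++ t) from rfl, PySem.Chars.join_cons_cons]
    have hrec := chars_join_prefix_mono sep (c :: M') (c :: (M' ++ t)) ⟨t, by simp⟩
    exact (List.prefix_append_right_inj (a ++ sep)).2 hrec

-- Chars.join of a tail is a suffix of the join
theorem chars_join_cons_suffix (sep : List Char) (x : List Char) (L : List (List Char)) :
    PySem.Chars.join sep L <:+ PySem.Chars.join sep (x :: L) := by
  cases L with
  | nil => simp [PySem.Chars.join_nil]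
  | cons y rest =>
    rw [PySem.Chars.join_cons_cons]
    exact List.suffix_append _ _

theorem chars_join_drop_suffix (sep : List Char) :
    ∀ (k : Nat) (L : List (List Char)),
      PySem.Chars.join sep (L.drop k) <:+ PySem.Chars.join sep L
  | 0, L => by simp
  | _ + 1, [] => by simp
  | k + 1, x :: L => by
    rw [List.drop_succ_cons]
    exact (chars_join_drop_suffix sep k L).trans (chars_join_cons_suffix sep x L)

-- monotonicity of "the joined prefix occurs in some joined train"
theorem isSublist_take_mono (test : List String) (trains : List (List String))
    {j k : Nat} (hjk : j ≤ k) (h : isSublist (test.take k) trains = true) :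
    isSublist (test.take j) trains = true := by
  simp only [isSublist, List.any_eq_true] at h ⊢
  obtain ⟨tr, htr, hin⟩ := h
  refine ⟨tr, htr, ?_⟩
  rw [PySem.Str.isIn_iff_infix] at hin ⊢
  refine List.IsPrefix.isInfix ?_ |>.trans hin
  rw [PySem.Str.toList_join, PySem.Str.toList_join]
  simp only [List.map_take]
  have := chars_join_prefix_mono "|".toList
    (((List.map String.toList test).take k).take j) ((List.map String.toList test).take k)
    (List.take_prefix _ _)
  rwa [List.take_take, min_eq_left hjk] at this

theorem isSublist_drop_mono (test : List String) (trains : List (List String))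
    {j k : Nat} (hjk : j ≤ k) (h : isSublist (test.drop j) trains = true) :
    isSublist (test.drop k) trains = true := by
  simp only [isSublist, List.any_eq_true] at h ⊢
  obtain ⟨tr, htr, hin⟩ := h
  refine ⟨tr, htr, ?_⟩
  rw [PySem.Str.isIn_iff_infix] at hin ⊢
  refine List.IsSuffix.isInfix ?_ |>.trans hin
  rw [PySem.Str.toList_join, PySem.Str.toList_join]
  simp only [List.map_drop]
  have := chars_join_drop_suffix "|".toList (k - j) ((List.map String.toList test).drop j)
  rw [List.drop_drop, show j + (k - j) = k by omega] at this
  exact this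

-- binary-search characterisations
theorem bsMaxGo_eq (P : Nat → Bool) (r : Nat) :
    ∀ (d lo hi : Nat), hi - lo ≤ d → lo ≤ r → r ≤ hi →
      (∀ k, lo < k → k ≤ r → P k = true) → (∀ k, r < k → k ≤ hi → P k = false) →
      bsMaxGo P d lo hi = r := by
  intro d
  induction d with
  | zero =>
    intro lo hi hd h1 h2 _ _
    rw [bsMaxGo]
    omega
  | succ d ih =>
    intro lo hi hd h1 h2 ht hf
    rw [bsMaxGo]
    by_cases h : lo < hi
    · simp only [if_pos h]
      by_cases hm : (lo + hi + 1) / 2 ≤ r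
      · rw [ht _ (by omega) hm]
        exact ih _ hi (by omega) hm h2 (fun k hk1 hk2 => ht k (by omega) hk2) hf
      · rw [hf _ (by omega) (by omega)]
        simp only [Bool.false_eq_true, if_false]
        exact ih lo _ (by omega) h1 (by omega) ht (fun k hk1 hk2 => hf k hk1 (by omega))
    · simp only [if_neg h]; omega

theorem bsMax_eq (P : Nat → Bool) (r lo hi : Nat) (h1 : lo ≤ r) (h2 : r ≤ hi)
    (ht : ∀ k, lo < k → k ≤ r → P k = true) (hf : ∀ k, r < k → k ≤ hi → P k = false) :
    bsMax P lo hi = r :=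
  bsMaxGo_eq P r (hi - lo) lo hi le_rfl h1 h2 ht hf

theorem bsMinGo_eq (P : Nat → Bool) (r : Nat) :
    ∀ (d lo hi : Nat), hi - lo ≤ d → lo ≤ r → r ≤ hi →
      (∀ k, lo ≤ k → k < r → P k = false) → (∀ k, r ≤ k → k < hi → P k = true) →
      bsMinGo P d lo hi = r := by
  intro d
  induction d with
  | zero =>
    intro lo hi hd h1 h2 _ _
    rw [bsMinGo]
    omega
  | succ d ih =>
    intro lo hi hd h1 h2 hf ht
    rw [bsMinGo]
    by_cases h : lo < hi
    · simp only [if_pos h]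
      by_cases hm : r ≤ (lo + hi) / 2
      · rw [ht _ hm (by omega)]
        exact ih lo _ (by omega) h1 hm hf (fun k hk1 hk2 => ht k hk1 (by omega))
      · rw [hf _ (by omega) (by omega)]
        simp only [Bool.false_eq_true, if_false]
        exact ih _ hi (by omega) (by omega) h2 (fun k hk1 hk2 => hf k (by omega) hk2) ht
    · simp only [if_neg h]; omega

theorem bsMin_eq (P : Nat → Bool) (r lo hi : Nat) (h1 : lo ≤ r) (h2 : r ≤ hi)
    (hf : ∀ k, lo ≤ k → k < r → P k = false) (ht : ∀ k, r ≤ k → k < hi → P k = true) :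
    bsMin P lo hi = r :=
  bsMinGo_eq P r (hi - lo) lo hi le_rfl h1 h2 hf ht

-- A's prefix scan: its range is (0, r), the scanned prefixes true below r and false at r
theorem flpsLoop_spec (test : List String) (trains : List (List String)) :
    ∀ (d i : Nat) (acc : List String), test.length - i ≤ d → i ≤ test.length →
      ∃ r : Nat, i ≤ r ∧ r ≤ test.length ∧
        (flpsLoop test trains d i acc).2 = (0, (r : Int)) ∧
        (∀ k, i ≤ k → k < r → isSublist (test.take (k + 1)) trains = true) ∧
        (r < test.length → isSublist (test.take (r + 1)) trains = false) := by
  intro d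
  induction d with
  | zero =>
    intro i acc hd hi
    exact ⟨test.length, by omega, le_refl _, rfl, by omega, by omega⟩
  | succ d ih =>
    intro i acc hd hi
    rw [flpsLoop]
    by_cases h : i < test.length
    · simp only [if_pos h]
      have hcast : ((i : Int) + 1) = ((i + 1 : Nat) : Int) := by push_cast; ring
      rw [hcast, PySem.List.slice_to_natCast]
      by_cases hs : isSublist (test.take (i + 1)) trains = true
      · rw [hs]
        simp only [if_true]
        obtain ⟨r, hr1, hr2, hr3, hr4, hr5⟩ :=
          ih (i + 1) (acc ++ [test.getD i ""]) (by omega) (by omega)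
        refine ⟨r, by omega, hr2, hr3, ?_, hr5⟩
        intro k hk1 hk2
        rcases Nat.eq_or_lt_of_le hk1 with hk | hk
        · rwa [← hk]
        · exact hr4 k hk hk2
      · rw [Bool.eq_false_iff.2 hs]
        simp only [Bool.false_eq_true, if_false]
        exact ⟨i, le_refl _, by omega, rfl, by omega, fun _ => Bool.eq_false_iff.2 hs⟩
    · simp only [if_neg h]
      exact ⟨test.length, by omega, le_refl _, rfl, by omega, by omega⟩

-- A's suffix scan (j counts down): its range is (r, n), suffixes from r on true, false at r-1
theorem flssLoop_spec (test : List String) (trains : List (List String)) :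
    ∀ (j : Nat) (acc : List String), j ≤ test.length →
      ∃ r : Nat, r ≤ j ∧
        (flssLoop test trains j acc).2 = ((r : Int), (test.length : Int)) ∧
        (∀ k, r ≤ k → k < j → isSublist (test.drop k) trains = true) ∧
        (0 < r → isSublist (test.drop (r - 1)) trains = false) := by
  intro j
  induction j with
  | zero =>
    intro acc _
    exact ⟨0, le_refl _, rfl, by omega, by omega⟩
  | succ i ih =>
    intro acc hj
    rw [flssLoop]
    have hsl : PySem.List.slice test (some (i : Int)) (some (test.length : Int))
        = test.drop i := by
      rw [PySem.List.slice_natCast, List.take_of_length_le (by simp)]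
    rw [hsl]
    by_cases hs : isSublist (test.drop i) trains = true
    · rw [hs]
      simp only [if_true]
      obtain ⟨r, hr1, hr2, hr3, hr4⟩ := ih (acc ++ [test.getD i ""]) (by omega)
      refine ⟨r, by omega, hr2, ?_, hr4⟩
      intro k hk1 hk2
      rcases Nat.lt_or_ge k i with hk | hk
      · exact hr3 k hk1 hk
      · rw [show k = i by omega]
        exact hs
    · rw [Bool.eq_false_iff.2 hs]
      simp only [Bool.false_eq_true, if_false]
      refine ⟨i + 1, le_refl _, by norm_num, by omega, ?_⟩
      intro _
      simpa using Bool.eq_false_iff.2 hs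

-- find_largest_prefix: its range is (0, p); for n ≥ 2, p is the bsMax value
theorem flp_spec (test : List String) (trains : List (List String)) :
    ∃ p : Nat, p ≤ test.length ∧
      (find_largest_prefix test trains).2 = (0, (p : Int)) ∧
      (2 ≤ test.length → p = bsMax (fun k => isSublist (test.take k) trains) 0 test.length) ∧
      (test.length ≤ 1 → p = 0) := by
  by_cases h : test.length ≤ 1
  · exact ⟨0, by omega, by simp [find_largest_prefix, h], by omega, fun _ => rfl⟩
  · obtain ⟨r, _, hr2, hr3, hr4, hr5⟩ :=
      flpsLoop_spec test trains test.length 0 [] (by omega) (by omega)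
    refine ⟨r, hr2, by simp [find_largest_prefix, h, hr3], fun _ => ?_, by omega⟩
    refine (bsMax_eq _ r 0 test.length (by omega) hr2 ?_ ?_).symm
    · intro k hk1 hk2
      have := hr4 (k - 1) (by omega) (by omega)
      rwa [show k - 1 + 1 = k by omega] at this
    · intro k hk1 _
      have hfail : isSublist (test.take (r + 1)) trains = false := hr5 (by omega)
      cases hPk : isSublist (test.take k) trains
      · rfl
      · have := isSublist_take_mono test trains (j := r + 1) (k := k) (by omega) hPk
        rw [hfail] at this
        exact absurd this (by simp)

-- find_largest_suffix: its range is (s, n); for n ≥ 2, s is the bsMin value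
theorem fls_spec (test : List String) (trains : List (List String)) :
    ∃ s : Nat, s ≤ test.length ∧
      (find_largest_suffix test trains).2 = ((s : Int), (test.length : Int)) ∧
      (2 ≤ test.length → s = bsMin (fun i => isSublist (test.drop i) trains) 0 test.length) ∧
      (test.length ≤ 1 → s = test.length) := by
  by_cases h : test.length ≤ 1
  · exact ⟨test.length, le_refl _, by simp [find_largest_suffix, h], by omega, fun _ => rfl⟩
  · obtain ⟨r, hr1, hr2, hr3, hr4⟩ := flssLoop_spec test trains test.length [] (le_refl _)
    refine ⟨r, hr1, by simp [find_largest_suffix, h, hr2], fun _ => ?_, by omega⟩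
    refine (bsMin_eq _ r 0 test.length (by omega) hr1 ?_ hr3).symm
    intro k _ hk2
    have hfail : isSublist (test.drop (r - 1)) trains = false := hr4 (by omega)
    cases hQk : isSublist (test.drop k) trains
    · rfl
    · have := isSublist_drop_mono test trains (j := k) (k := r - 1) (by omega) hQk
      rw [hfail] at this
      exact absurd this (by simp)

-- for a segment of length ≥ 2, A's two scan values are exactly B's two binary-search values
theorem seg_vals (trains : List (List String)) (seg : List String) (hn : 1 < seg.length) :
    ∃ p s : Nat, p ≤ seg.length ∧ s ≤ seg.length ∧
      (find_largest_prefix seg trains).2 = (0, (p : Int)) ∧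
      (find_largest_suffix seg trains).2 = ((s : Int), (seg.length : Int)) ∧
      bsMax (fun k => okB (trains.map (fun t => PySem.Str.join "|" t))
        (PySem.List.slice seg none (some (k : Int)))) 0 seg.length = p ∧
      bsMin (fun i => okB (trains.map (fun t => PySem.Str.join "|" t))
        (PySem.List.slice seg (some (i : Int)) none)) 0 seg.length = s := by
  obtain ⟨p, hp1, hp2, hp3, _⟩ := flp_spec seg trains
  obtain ⟨s, hs1, hs2, hs3, _⟩ := fls_spec seg trains
  refine ⟨p, s, hp1, hs1, hp2, hs2, ?_, ?_⟩
  · have hfun : (fun (k : Nat) => okB (trains.map (fun t => PySem.Str.join "|" t))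
        (PySem.List.slice seg none (some (k : Int))))
      = (fun (k : Nat) => isSublist (seg.take k) trains) := by
      funext k
      rw [PySem.List.slice_to_natCast, okB_eq]
    rw [hfun]
    exact (hp3 (by omega)).symm
  · have hfun : (fun (i : Nat) => okB (trains.map (fun t => PySem.Str.join "|" t))
        (PySem.List.slice seg (some (i : Int)) none))
      = (fun (i : Nat) => isSublist (seg.drop i) trains) := by
      funext i
      rw [PySem.List.slice_from_natCast, okB_eq]
    rw [hfun]
    exact (hs3 (by omega)).symm

-- pin down p (resp. s) from an equality of A's returned ranges
theorem nat_of_cast_pair_fst {p q : Nat} {a b : Int} (h : ((a, (p : Int)) : Int × Int) = (b, (q : Int))) : p = q := by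
  exact_mod_cast (show ((p : Int)) = ((q : Int)) from congrArg Prod.snd h)

theorem nat_of_cast_pair_snd {p q : Nat} {a b : Int} (h : (((p : Int), a) : Int × Int) = ((q : Int), b)) : p = q := by
  exact_mod_cast (show ((p : Int)) = ((q : Int)) from congrArg Prod.fst h)

-- the two while loops agree (B carries one more unit of fuel: A tested p > s before entering)
theorem aLoop_eq_bLoop (trains : List (List String)) :
    ∀ (fuel : Nat) (seg : List String) (p s : Nat),
      (find_largest_prefix seg trains).2 = (0, (p : Int)) →
      (find_largest_suffix seg trains).2 = ((s : Int), (seg.length : Int)) →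
      p ≤ s →
      aLoop trains fuel seg (0, (p : Int)) ((s : Int), (seg.length : Int))
        = bLoop (trains.map (fun t => PySem.Str.join "|" t)) (fuel + 1) seg := by
  intro fuel
  induction fuel with
  | zero =>
    intro seg p s hp hs hps
    rw [aLoop, bLoop]
    by_cases hn : 1 < seg.length
    · obtain ⟨p', s', _, _, hp2, hs2, hbsp, hbss⟩ := seg_vals trains seg hn
      have hpp : p' = p := nat_of_cast_pair_fst (hp2.symm.trans hp)
      have hss : s' = s := nat_of_cast_pair_snd (hs2.symm.trans hs)
      rw [hpp] at hbsp
      rw [hss] at hbss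
      simp only [if_pos hn, hbsp, hbss]
      rw [if_neg (by omega : ¬ s < p)]
      split_ifs <;> rfl
    · simp only [if_neg hn]
  | succ fuel ih =>
    intro seg p s hp hs hps
    rw [aLoop, bLoop]
    by_cases hn : 1 < seg.length
    · obtain ⟨p', s', _, hsle, hp2, hs2, hbsp, hbss⟩ := seg_vals trains seg hn
      have hpp : p' = p := nat_of_cast_pair_fst (hp2.symm.trans hp)
      have hss : s' = s := nat_of_cast_pair_snd (hs2.symm.trans hs)
      rw [hpp] at hbsp
      rw [hss] at hbss
      obtain ⟨p₁, hq1, hq2, hq3, hq4⟩ :=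
        flp_spec (PySem.List.slice seg (some (p : Int)) (some ((s : Int) + 1))) trains
      obtain ⟨s₂, hw1, hw2, hw3, hw4⟩ :=
        fls_spec (PySem.List.slice seg (some (p : Int)) (some ((s : Int) + 1))) trains
      simp only [if_pos hn, hbsp, hbss]
      rw [if_neg (by omega : ¬ s < p)]
      rw [hq2, hw2]
      simp only [Bool.and_eq_true, decide_eq_true_eq, gt_iff_lt, sub_zero]
      split_ifs with hA hI hB hB2 hB3
      · -- A found an overlap on the next segment; B sees it on its next pass
        have hI' : s₂ < p₁ := by exact_mod_cast hI
        have hn' : 1 < (PySem.List.slice seg (some (p : Int)) (some ((s : Int) + 1))).length := by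
          by_contra hle
          have := hq4 (by omega)
          omega
        symm
        rw [bLoop]
        obtain ⟨pa, sa, _, _, ha2, ha3, hbsp', hbss'⟩ := seg_vals trains _ hn'
        have hpa : pa = p₁ := nat_of_cast_pair_fst (ha2.symm.trans hq2)
        have hsa : sa = s₂ := nat_of_cast_pair_snd (ha3.symm.trans hw2)
        rw [hpa] at hbsp'
        rw [hsa] at hbss'
        simp only [if_pos hn', hbsp', hbss']
        rw [if_pos hI']
      · omega
      · exact ih _ p₁ s₂ hq2 hw2 (by exact_mod_cast not_lt.mp hI)
      · exfalso; omega
      · exfalso; omega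
      · rfl
    · simp only [if_neg hn]
      obtain ⟨p', _, hp2, _, hp0⟩ := flp_spec seg trains
      have hpp : p = 0 := by
        rw [← nat_of_cast_pair_fst (hp2.symm.trans hp)]
        exact hp0 (by omega)
      norm_num [hpp]

-- the two entry points agree
theorem main_eq (test : List String) (trains : List (List String)) :
    contains_existing_seq test trains = contains_existing_seq_alt test trains := by
  simp only [contains_existing_seq, contains_existing_seq_alt, okB_eq]
  by_cases hd : isSublist test trains = true
  · rw [if_pos hd, if_pos hd]
  · have hd' : isSublist test trains = false := Bool.eq_false_iff.2 hd
    simp only [hd', Bool.false_eq_true, if_false]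
    obtain ⟨pz, hz1, hz2, hz3, hz4⟩ := flp_spec test trains
    obtain ⟨sz, hy1, hy2, hy3, hy4⟩ := fls_spec test trains
    rw [hz2, hy2]
    simp only [gt_iff_lt]
    by_cases hgt : sz < pz
    · rw [if_pos (show ((sz : Int) < (pz : Int)) by exact_mod_cast hgt)]
      have hn : 1 < test.length := by
        by_contra hle
        have h1 := hz4 (by omega)
        have h2 := hy4 (by omega)
        omega
      symm
      rw [bLoop]
      obtain ⟨pa, sa, _, _, ha2, ha3, hbsp, hbss⟩ := seg_vals trains test hn
      have hpa : pa = pz := nat_of_cast_pair_fst (ha2.symm.trans hz2)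
      have hsa : sa = sz := nat_of_cast_pair_snd (ha3.symm.trans hy2)
      rw [hpa] at hbsp
      rw [hsa] at hbss
      simp only [if_pos hn, hbsp, hbss]
      rw [if_pos hgt]
    · rw [if_neg (show ¬ ((sz : Int) < (pz : Int)) by exact_mod_cast hgt)]
      exact aLoop_eq_bLoop trains test.length test pz sz hz2 hy2 (by omega)

-- ===== VERDICT (by name: the statement is the Claim_ definition above) =====
theorem contains_existing_seq_spec : Claim_equal_contains_existing_seq := by
  intro test_seq train_seqs _dom
  unfold Spec_contains_existing_seq
  exact main_eq test_seq train_seqs
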